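-- pv_equiv track=rewrite | github.com/kreeshnaydv/Programming-for-developers | question3/pattern_sequence.py | max_pattern_extraction
-- ===== SOURCE A (Python) =====
-- def max_pattern_extraction(p1: str, t1: int, p2: str, t2: int) -> int:
--     """
--     Returns the maximum number of times p2 can be formed as a subsequence from p1 repeated t1 times, divided by t2.
--     Args:
--         p1: Base pattern for sequence A.
--         t1: Number of times p1 is repeated.
--         p2: Base pattern for sequence B.
--         t2: Number of times p2 is repeated.
--     Returns:
--         Maximum x such that p2 * t2 can be extracted from p1 * t1.
--     """
--     seqA = p1 * t1
--     seqB = p2 * t2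
--     idxA = idxB = count = 0
--     while idxA < len(seqA) and idxB < len(seqB):
--         if seqA[idxA] == seqB[idxB]:
--             idxB += 1
--         idxA += 1
--         if idxB == len(seqB):
--             count += 1
--             idxB = 0
--     return count
-- ===== SOURCE B (Python) =====
-- def max_pattern_extraction(p1: str, t1: int, p2: str, t2: int) -> int:
--     # Per-block transition table (LeetCode 466 style): for each start index j in p2,
--     # precompute how one copy of p1 advances the p2-scan; then fold over the t1 blocks
--     # and divide the total p2-completions by t2.
--     if t1 <= 0 or t2 <= 0 or not p1 or not p2:
--         return 0
--     n = len(p2)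
--     step = []
--     for j in range(n):
--         c, k = 0, j
--         for ch in p1:
--             if ch == p2[k]:
--                 k += 1
--                 if k == n:
--                     c, k = c + 1, 0
--         step.append((c, k))
--     total, j = 0, 0
--     for _ in range(t1):
--         c, j = step[j]
--         total += c
--     return total // t2
-- ===== Notes on version B (the rewrite author's own statement) =====
-- stated objective: faster
-- what changed: Replaces A's char-by-char scan of the fully materialised p1*t1 against p2*t2 by a LeetCode-466-style per-start-index transition table computed on one copy of p1, folded over the t1 blocks, with the total p2-completions floor-divided by t2.
import Mathlib
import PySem

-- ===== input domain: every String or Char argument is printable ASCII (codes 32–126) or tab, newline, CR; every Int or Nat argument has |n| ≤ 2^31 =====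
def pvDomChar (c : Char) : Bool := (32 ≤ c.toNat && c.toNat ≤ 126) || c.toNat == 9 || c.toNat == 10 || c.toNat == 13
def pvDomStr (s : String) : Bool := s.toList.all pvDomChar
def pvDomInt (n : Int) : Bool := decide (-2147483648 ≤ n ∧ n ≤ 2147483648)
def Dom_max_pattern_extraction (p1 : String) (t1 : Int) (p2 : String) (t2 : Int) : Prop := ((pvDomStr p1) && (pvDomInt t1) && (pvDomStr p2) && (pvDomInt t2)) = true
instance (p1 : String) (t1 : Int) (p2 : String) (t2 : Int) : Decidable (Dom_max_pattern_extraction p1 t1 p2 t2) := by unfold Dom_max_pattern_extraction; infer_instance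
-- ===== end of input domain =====

-- B replaces A's char-by-char scan of p1*t1 against p2*t2 by a per-start-index transition
-- table over one copy of p1 folded over the t1 blocks (objective: faster, asymptotic).

-- ===== PORT A =====
-- A's while loop: idxA advances by one every iteration, so the recursion consumes seqA;
-- seqB[idxB] is guarded by idxB < len(seqB), ported with getD under that guard (exact).
def pvLoopA (seqB : List Char) : List Char → Nat → Nat → Nat
  | [], _, count => count
  | a :: rest, idxB, count =>
    if idxB < seqB.length then
      let idxB' := if a = seqB.getD idxB 'x' then idxB + 1 else idxB
      if idxB' = seqB.length then pvLoopA seqB rest 0 (count + 1)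
      else pvLoopA seqB rest idxB' count
    else count

def max_pattern_extraction (p1 : String) (t1 : Int) (p2 : String) (t2 : Int) : Int :=
  -- seqA = 'p1 * t1', seqB = 'p2 * t2': Python string repetition, empty for t ≤ 0 (hand port, exact)
  ((pvLoopA ((List.replicate t2.toNat p2.toList).flatten)
      ((List.replicate t1.toNat p1.toList).flatten) 0 0 : Nat) : Int)

-- ===== PORT B =====
-- B's inner scan: advance the (completions, index-in-p2) state across one list of chars.
def pvBlock (p2l : List Char) : List Char → Nat × Nat → Nat × Nat
  | [], ck => ck
  | ch :: rest, (c, k) =>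
    if ch = p2l.getD k 'x' then
      if k + 1 = p2l.length then pvBlock p2l rest (c + 1, 0)
      else pvBlock p2l rest (c, k + 1)
    else pvBlock p2l rest (c, k)

def max_pattern_extraction_alt (p1 : String) (t1 : Int) (p2 : String) (t2 : Int) : Int :=
  if t1 ≤ 0 ∨ t2 ≤ 0 ∨ p1.toList = [] ∨ p2.toList = [] then 0
  else
    -- step = the per-start-index transition table, res = (total, j) after the t1 blocks
    PySem.Int.floordiv
      ((((List.range t1.toNat).foldl
        (fun (tj : Nat × Nat) _ =>
          let s := ((List.range p2.toList.length).map
            (fun j => pvBlock p2.toList p1.toList (0, j))).getD tj.2 (0, 0)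
          (tj.1 + s.1, s.2)) (0, 0)).1 : Nat) : Int) t2

-- ===== PRECONDITION & SPEC =====
def Spec_max_pattern_extraction (p1 : String) (t1 : Int) (p2 : String) (t2 : Int) (out : Int) : Prop := out = max_pattern_extraction_alt p1 t1 p2 t2
instance (p1 : String) (t1 : Int) (p2 : String) (t2 : Int) (out : Int) : Decidable (Spec_max_pattern_extraction p1 t1 p2 t2 out) := by unfold Spec_max_pattern_extraction; infer_instance

-- ===== CLAIM (what is proved, stated in full; the proofs are below) =====
def Claim_equal_max_pattern_extraction : Prop := ∀ (p1 : String) (t1 : Int) (p2 : String) (t2 : Int), Dom_max_pattern_extraction p1 t1 p2 t2 → Spec_max_pattern_extraction p1 t1 p2 t2 (max_pattern_extraction p1 t1 p2 t2)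

-- ===== LEMMAS AND PROOFS =====

lemma pvFlatLen (xs : List Char) (t : Nat) :
    ((List.replicate t xs).flatten).length = t * xs.length := by
  induction t with
  | zero => simp
  | succ t ih => simp [List.replicate_succ, ih]; ring

lemma pvFlatGetD (xs : List Char) (t r k : Nat) (d : Char) (hk : k < xs.length) (hr : r < t) :
    ((List.replicate t xs).flatten).getD (r * xs.length + k) d = xs.getD k d := by
  induction r generalizing t with
  | zero =>
    cases t with
    | zero => omega
    | succ t' =>
      rw [List.replicate_succ, List.flatten_cons]
      simp only [List.getD, Nat.zero_mul, Nat.zero_add]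
      rw [List.getElem?_append_left hk]
  | succ r' ih =>
    cases t with
    | zero => omega
    | succ t' =>
      have he : (r' + 1) * xs.length + k = xs.length + (r' * xs.length + k) := by ring
      rw [List.replicate_succ, List.flatten_cons, he]
      simp only [List.getD]
      rw [List.getElem?_append_right (by omega)]
      have := ih t' (by omega)
      simpa [List.getD] using this

lemma pvMulLt (a b c d : Nat) (h1 : a < b) (h2 : c < d) : a * d + c < b * d := by
  calc a * d + c < a * d + d := by omega
    _ = (a + 1) * d := by ring
    _ ≤ b * d := Nat.mul_le_mul_right d (by omega)

lemma pvBlock_add (p2l : List Char) (xs : List Char) :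
    ∀ c k, pvBlock p2l xs (c, k) =
      (c + (pvBlock p2l xs (0, k)).1, (pvBlock p2l xs (0, k)).2) := by
  induction xs with
  | nil => intro c k; simp [pvBlock]
  | cons ch rest ih =>
    intro c k
    simp only [pvBlock]
    split_ifs with h1 h2
    · simp only [Nat.zero_add]
      rw [ih (c+1) 0, ih 1 0]
      simp only [Nat.add_assoc]
    · exact ih c (k+1)
    · exact ih c k

lemma pvBlock_lt (p2l : List Char) (hn : 0 < p2l.length) (xs : List Char) :
    ∀ c k, k < p2l.length → (pvBlock p2l xs (c, k)).2 < p2l.length := by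
  induction xs with
  | nil => intro c k hk; simpa [pvBlock] using hk
  | cons ch rest ih =>
    intro c k hk
    simp only [pvBlock]
    split_ifs with h1 h2
    · exact ih (c+1) 0 hn
    · exact ih c (k+1) (by omega)
    · exact ih c k hk

lemma pvBlock_append (p2l xs ys : List Char) :
    ∀ s, pvBlock p2l (xs ++ ys) s = pvBlock p2l ys (pvBlock p2l xs s) := by
  induction xs with
  | nil => intro s; simp [pvBlock]
  | cons ch rest ih =>
    intro s
    obtain ⟨c, k⟩ := s
    simp only [List.cons_append, pvBlock]
    split_ifs <;> apply ih

-- A-characterisation: scanning from position r*n+k in seqB (r copies of p2 plus k chars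
-- already matched) yields count plus the floor of total p2-completions over t2.
lemma pvCore (p2l : List Char) (t2 : Nat) (ht2 : 0 < t2) (hn : 0 < p2l.length) :
    ∀ (xs : List Char) (r k count : Nat), r < t2 → k < p2l.length →
      pvLoopA ((List.replicate t2 p2l).flatten) xs (r * p2l.length + k) count =
        count + (r + (pvBlock p2l xs (0, k)).1) / t2 := by
  intro xs
  induction xs with
  | nil =>
    intro r k count hr hk
    simp [pvLoopA, pvBlock, Nat.div_eq_of_lt hr]
  | cons a rest ih =>
    intro r k count hr hk
    have hlen : ((List.replicate t2 p2l).flatten).length = t2 * p2l.length := pvFlatLen _ _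
    have hidx : r * p2l.length + k < t2 * p2l.length := pvMulLt _ _ _ _ hr hk
    have hget : ((List.replicate t2 p2l).flatten).getD (r * p2l.length + k) 'x' = p2l.getD k 'x' :=
      pvFlatGetD _ _ _ _ _ hk hr
    rw [pvLoopA, hlen, hget]
    rw [if_pos hidx]
    simp only [pvBlock, Nat.zero_add]
    by_cases hm : a = p2l.getD k 'x'
    · rw [if_pos hm, if_pos hm]
      by_cases hk1 : k + 1 = p2l.length
      · rw [if_pos hk1]
        by_cases hr1 : r + 1 = t2
        · have heq : r * p2l.length + k + 1 = t2 * p2l.length := by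
            rw [← hr1, ← hk1]; ring
          rw [if_pos heq]
          have := ih 0 0 (count + 1) ht2 hn
          rw [Nat.zero_mul, Nat.zero_add] at this
          rw [this]
          rw [pvBlock_add p2l rest 1 0]
          simp only [Nat.zero_add]
          have hd : (r + (1 + (pvBlock p2l rest (0, 0)).1)) / t2 =
              (pvBlock p2l rest (0, 0)).1 / t2 + 1 := by
            have he2 : r + (1 + (pvBlock p2l rest (0, 0)).1) =
                (pvBlock p2l rest (0, 0)).1 + t2 := by omega
            rw [he2, Nat.add_div_right _ ht2]
          rw [hd]
          omega
        · have hne : r * p2l.length + k + 1 ≠ t2 * p2l.length := by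
            have h1 : r * p2l.length + k + 1 = (r + 1) * p2l.length := by
              rw [← hk1]; ring
            rw [h1]
            intro hc
            exact hr1 (Nat.eq_of_mul_eq_mul_right hn hc)
          rw [if_neg hne]
          have h1 : r * p2l.length + k + 1 = (r + 1) * p2l.length + 0 := by
            rw [← hk1]; ring
          rw [h1]
          have := ih (r + 1) 0 count (by omega) hn
          rw [this]
          rw [pvBlock_add p2l rest 1 0]
          congr 2
          omega
      · rw [if_neg hk1]
        have hne : r * p2l.length + k + 1 ≠ t2 * p2l.length := by
          have : r * p2l.length + (k + 1) < t2 * p2l.length := pvMulLt _ _ _ _ hr (by omega)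
          omega
        rw [if_neg hne]
        have h1 : r * p2l.length + k + 1 = r * p2l.length + (k + 1) := by ring
        rw [h1]
        exact ih r (k + 1) count hr (by omega)
    · rw [if_neg hm, if_neg hm]
      have hne : r * p2l.length + k ≠ t2 * p2l.length := by omega
      rw [if_neg hne]
      exact ih r k count hr hk

lemma pvGetDMapRange {α : Type} (f : Nat → α) (n j : Nat) (d : α) (hj : j < n) :
    ((List.range n).map f).getD j d = f j := by
  simp [List.getD, hj]

-- B's fold over the t1 blocks equals the scan of the concatenated blocks.
lemma pvFold_eq (p2l p1l : List Char) (hn : 0 < p2l.length) (i : Nat) :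
    (List.range i).foldl
      (fun (tj : Nat × Nat) _ =>
        let s := (((List.range p2l.length).map (fun j => pvBlock p2l p1l (0, j))).getD tj.2 (0, 0))
        (tj.1 + s.1, s.2)) (0, 0) =
      pvBlock p2l ((List.replicate i p1l).flatten) (0, 0) := by
  induction i with
  | zero => simp [pvBlock]
  | succ i ih =>
    rw [List.range_succ, List.foldl_append, ih]
    have hj : (pvBlock p2l ((List.replicate i p1l).flatten) (0, 0)).2 < p2l.length :=
      pvBlock_lt p2l hn _ 0 0 hn
    simp only [List.foldl_cons, List.foldl_nil]
    rw [pvGetDMapRange _ _ _ _ hj]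
    have hrep : (List.replicate (i + 1) p1l).flatten =
        (List.replicate i p1l).flatten ++ p1l := by
      rw [List.replicate_succ', List.flatten_append]; simp
    rw [hrep, pvBlock_append]
    obtain ⟨c, k⟩ := pvBlock p2l ((List.replicate i p1l).flatten) (0, 0)
    rw [pvBlock_add p2l p1l c k]

-- ===== VERDICT (by name: the statement is the Claim_ definition above) =====
theorem max_pattern_extraction_spec : Claim_equal_max_pattern_extraction := by
  intro p1 t1 p2 t2 _
  unfold Spec_max_pattern_extraction max_pattern_extraction max_pattern_extraction_alt
  by_cases hg : t1 ≤ 0 ∨ t2 ≤ 0 ∨ p1.toList = [] ∨ p2.toList = []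
  · rw [if_pos hg]
    -- A also returns 0 on the guard region
    rcases hg with h | h | h | h
    · have : t1.toNat = 0 := by omega
      simp [this, pvLoopA]
    · have : t2.toNat = 0 := by omega
      simp only [this, List.replicate, List.flatten_nil]
      cases (List.replicate t1.toNat p1.toList).flatten with
      | nil => simp [pvLoopA]
      | cons a rest => simp [pvLoopA]
    · simp only [h]
      have : (List.replicate t1.toNat ([] : List Char)).flatten = [] := by
        simp
      simp [this, pvLoopA]
    · simp only [h]
      have hB : (List.replicate t2.toNat ([] : List Char)).flatten = [] := by simp
      rw [hB]
      cases (List.replicate t1.toNat p1.toList).flatten with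
      | nil => simp [pvLoopA]
      | cons a rest => simp [pvLoopA]
  · rw [if_neg hg]
    simp only [not_or, not_le] at hg
    obtain ⟨ht1, ht2, hp1, hp2⟩ := hg
    have hn : 0 < p2.toList.length := List.length_pos_iff.mpr hp2
    have ht2n : 0 < t2.toNat := by omega
    have hA := pvCore p2.toList t2.toNat ht2n hn
      ((List.replicate t1.toNat p1.toList).flatten) 0 0 0 ht2n hn
    simp only [Nat.zero_mul, Nat.zero_add] at hA
    rw [hA]
    rw [pvFold_eq p2.toList p1.toList hn t1.toNat]
    have ht2e : (t2 : Int) = ((t2.toNat : Nat) : Int) := by omega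
    rw [ht2e]
    exact (PySem.Int.floordiv_natCast _ _).symm
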